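-- pv_equiv track=rewrite | github.com/KurbanIntelligenceLab/dBG-Power-Grid-Timesnet | dBG/utils/strUtils.py | match_strings
-- ===== SOURCE A (Python) =====
-- def match_strings(string_list, pattern, gap_char):
--     count = 0
--     for edge in string_list:
--         string = edge[0]
--         weight = edge[1]
--         if len(string) != len(pattern):
--             continue
--         match = True
--         for i in range(len(string)):
--             if pattern[i] != gap_char and pattern[i] != string[i]:
--                 match = False
--                 break
--         if match:
--             count += weight
--     return count
-- ===== SOURCE B (Python) =====
-- def match_strings(string_list, pattern, gap_char):
--     # Hash-aggregation: mask each equal-length string at the pattern's gap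
--     # positions, group weight totals by masked key in a dict, then answer
--     # with a single lookup of the pattern itself.
--     n = len(pattern)
--     gaps = [c == gap_char for c in pattern]
--     totals = {}
--     for s, w in string_list:
--         if len(s) == n:
--             key = ''.join(gap_char if g else c for g, c in zip(gaps, s))
--             totals[key] = totals.get(key, 0) + w
--     return totals.get(pattern, 0)
-- ===== Notes on version B (the rewrite author's own statement) =====
-- stated objective: alternative
-- what changed: B replaces A's per-string position scan with hash aggregation: it masks every equal-length string at the pattern's gap positions, accumulates weight totals per masked key in a dict, and returns a single dict lookup of the pattern; no string is ever compared against the pattern directly.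
import Mathlib
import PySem

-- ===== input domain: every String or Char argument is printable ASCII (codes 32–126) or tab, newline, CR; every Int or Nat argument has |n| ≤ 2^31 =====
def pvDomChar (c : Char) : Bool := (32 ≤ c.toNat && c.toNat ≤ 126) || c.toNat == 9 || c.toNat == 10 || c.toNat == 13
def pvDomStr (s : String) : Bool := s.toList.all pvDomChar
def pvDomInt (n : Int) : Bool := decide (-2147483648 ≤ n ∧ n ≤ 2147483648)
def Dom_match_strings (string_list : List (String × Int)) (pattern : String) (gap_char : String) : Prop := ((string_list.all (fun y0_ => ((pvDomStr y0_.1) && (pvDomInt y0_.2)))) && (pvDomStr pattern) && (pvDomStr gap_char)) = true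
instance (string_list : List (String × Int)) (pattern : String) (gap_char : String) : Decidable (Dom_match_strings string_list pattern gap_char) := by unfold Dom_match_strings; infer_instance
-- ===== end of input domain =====

-- B replaces A's per-string position scan by hash aggregation: each equal-length
-- string is masked at the pattern's gap positions, weight totals are grouped per
-- masked key in a dict, and the answer is one lookup of the pattern (objective:
-- alternative); return values proved equal on all inputs.

-- ===== PORT A =====
-- inner 'for i in range(len(string))' loop with its break: recursion over the index list;
-- pattern[i] / string[i] are length-1 Python strings, modelled as singleton Char lists.
def msInnerA (p s gap : List Char) : List Int → Bool
  | [] => true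
  | i :: rest =>
    if (PySem.List.pyGet? p i).map (fun c => [c]) ≠ some gap ∧
       (PySem.List.pyGet? p i).map (fun c => [c]) ≠ (PySem.List.pyGet? s i).map (fun c => [c]) then
      false
    else msInnerA p s gap rest

def match_strings (string_list : List (String × Int)) (pattern : String) (gap_char : String) : Int :=
  string_list.foldl
    (fun count edge =>
      let string := edge.1
      let weight := edge.2
      if PySem.Str.len string ≠ PySem.Str.len pattern then count
      else if msInnerA pattern.toList string.toList gap_char.toList
              (PySem.List.pyRange 0 (PySem.Str.len string) 1) then count + weight
      else count)
    0

-- ===== PORT B =====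
-- gaps = [c == gap_char for c in pattern]; totals[key] = totals.get(key, 0) + w with
-- key = ''.join(gap_char if g else c for g, c in zip(gaps, s)); return totals.get(pattern, 0).
-- ''.join of length-1-or-gap_char pieces is the flatten of the corresponding Char lists.
def match_strings_alt (string_list : List (String × Int)) (pattern : String) (gap_char : String) : Int :=
  let n := PySem.Str.len pattern
  let gaps := pattern.toList.map (fun c => [c] == gap_char.toList)
  let totals := string_list.foldl
    (fun d e =>
      if PySem.Str.len e.1 == n then
        let key := ((gaps.zip e.1.toList).map
          (fun p => if p.1 then gap_char.toList else [p.2])).flatten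
        d.insert key (d.getD key 0 + e.2)
      else d)
    (PySem.Dict.empty (κ := List Char) (ν := Int))
  totals.getD pattern.toList 0

-- ===== PRECONDITION & SPEC =====
def Spec_match_strings (string_list : List (String × Int)) (pattern : String) (gap_char : String) (out : Int) : Prop := out = match_strings_alt string_list pattern gap_char
instance (string_list : List (String × Int)) (pattern : String) (gap_char : String) (out : Int) : Decidable (Spec_match_strings string_list pattern gap_char out) := by unfold Spec_match_strings; infer_instance

-- ===== CLAIM (what is proved, stated in full; the proofs are below) =====
def Claim_equal_match_strings : Prop := ∀ (string_list : List (String × Int)) (pattern : String) (gap_char : String), Dom_match_strings string_list pattern gap_char → Spec_match_strings string_list pattern gap_char (match_strings string_list pattern gap_char)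

-- ===== LEMMAS AND PROOFS =====

-- A's per-string check equals the pointwise predicate on the zipped lists.
lemma msInnerA_eq_zip (P S gap : List Char) (hlen : S.length = P.length) :
    ∀ (n k : Nat), P.length - k = n →
      msInnerA P S gap (PySem.List.pyRange (k : Int) (P.length : Int) 1)
        = ((P.drop k).zip (S.drop k)).all (fun pc => ([pc.1] == gap) || (pc.1 == pc.2)) := by
  intro n
  induction n with
  | zero =>
    intro k hk
    have hk' : P.length ≤ k := by omega
    rw [PySem.List.pyRange_one_eq_nil (by exact_mod_cast hk')]
    rw [List.drop_eq_nil_of_le hk']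
    simp [msInnerA]
  | succ m ih =>
    intro k hk
    have hklt : k < P.length := by omega
    have hks : k < S.length := by omega
    rw [PySem.List.pyRange_one_cons (by exact_mod_cast hklt)]
    have h1 : PySem.List.pyGet? P (k : Int) = some P[k] := by
      simp [PySem.List.pyGet?_natCast, List.getElem?_eq_getElem hklt]
    have h2 : PySem.List.pyGet? S (k : Int) = some S[k] := by
      simp [PySem.List.pyGet?_natCast, List.getElem?_eq_getElem hks]
    have hdP : P.drop k = P[k] :: P.drop (k + 1) := List.drop_eq_getElem_cons hklt
    have hdS : S.drop k = S[k] :: S.drop (k + 1) := List.drop_eq_getElem_cons hks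
    have hrec : ((k : Int) + 1) = ((k + 1 : Nat) : Int) := by push_cast; ring
    rw [msInnerA, h1, h2, hdP, hdS]
    simp only [Option.map_some, List.zip_cons_cons, List.all_cons]
    by_cases hgap : [P[k]] = gap
    · have hni : ¬ (some [P[k]] ≠ some gap ∧ some [P[k]] ≠ some [S[k]]) := by
        intro h; exact h.1 (by simp [hgap])
      rw [if_neg hni, hrec, ih (k + 1) (by omega)]
      simp [hgap]
    · by_cases hc : P[k] = S[k]
      · have hni : ¬ (some [P[k]] ≠ some gap ∧ some [P[k]] ≠ some [S[k]]) := by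
          intro h; exact h.2 (by simp [hc])
        rw [if_neg hni, hrec, ih (k + 1) (by omega)]
        simp [hc]
      · have hyi : (some [P[k]] ≠ some gap ∧ some [P[k]] ≠ some [S[k]]) := by
          refine ⟨by simp [hgap], ?_⟩
          simp only [ne_eq, Option.some.injEq, List.cons.injEq, and_true]
          exact hc
        rw [if_pos hyi]
        have hpred : (([P[k]] == gap) || (P[k] == S[k])) = false := by
          simp [hgap, hc]
        rw [hpred]
        simp

-- B's masked key equals the pattern iff the pointwise predicate holds (equal lengths).
lemma maskKey_eq_iff (gap : List Char) :
    ∀ (P S : List Char), P.length = S.length →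
      ((((P.map (fun c => [c] == gap)).zip S).map
          (fun p => if p.1 then gap else [p.2])).flatten = P
        ↔ (P.zip S).all (fun pc => ([pc.1] == gap) || (pc.1 == pc.2)) = true) := by
  intro P
  induction P with
  | nil =>
    intro S h
    have : S = [] := List.length_eq_zero_iff.mp h.symm
    subst this; simp
  | cons p P' ih =>
    intro S h
    match S with
    | [] => simp at h
    | s :: S' =>
      have h' : P'.length = S'.length := by simpa using h
      simp only [List.map_cons, List.zip_cons_cons, List.all_cons, List.flatten_cons]
      by_cases hgap : [p] = gap
      · subst hgap
        rw [if_pos (by simp)]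
        simp only [List.cons_append, List.nil_append, List.cons.injEq, true_and]
        rw [ih S' h']
        simp
      · rw [if_neg (by simp [hgap])]
        simp only [List.cons_append, List.nil_append, List.cons.injEq]
        rw [ih S' h']
        have hg : ([p] == gap) = false := by simp [hgap]
        rw [hg, Bool.false_or, Bool.and_eq_true, beq_iff_eq]
        exact ⟨fun ⟨a, b⟩ => ⟨a.symm, b⟩, fun ⟨a, b⟩ => ⟨a.symm, b⟩⟩

-- The dict-aggregation fold, looked up at q, adds the filtered weight sum.
lemma dict_fold_getD (key : String × Int → List Char) (cond : String × Int → Bool)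
    (q : List Char) :
    ∀ (l : List (String × Int)) (d : PySem.Dict (List Char) Int),
      (l.foldl (fun d e => if cond e then d.insert (key e) (d.getD (key e) 0 + e.2) else d) d).getD q 0
        = d.getD q 0 + ((l.filter (fun e => cond e && (key e == q))).map (·.2)).sum := by
  intro l
  induction l with
  | nil => intro d; simp
  | cons e l' ih =>
    intro d
    simp only [List.foldl_cons, List.filter_cons]
    by_cases hc : cond e = true
    · rw [if_pos hc, ih]
      by_cases hk : key e = q
      · have : (cond e && (key e == q)) = true := by simp [hc, hk]
        rw [this, if_pos rfl]
        rw [PySem.Dict.getD_insert]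
        rw [if_pos hk.symm, hk]
        simp only [List.map_cons, List.sum_cons]
        ring
      · have : (cond e && (key e == q)) = false := by simp [hk]
        rw [this, if_neg Bool.false_ne_true]
        rw [PySem.Dict.getD_insert, if_neg (fun h => hk h.symm)]
    · have hcf : cond e = false := by simpa using hc
      rw [if_neg (by simp [hcf]), ih]
      rw [hcf]
      simp
-- A's fold from acc adds the same filtered weight sum.
lemma a_fold_sum (pattern gap_char : String) :
    ∀ (sl : List (String × Int)) (acc : Int),
      sl.foldl
        (fun count edge =>
          let string := edge.1
          let weight := edge.2
          if PySem.Str.len string ≠ PySem.Str.len pattern then count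
          else if msInnerA pattern.toList string.toList gap_char.toList
                  (PySem.List.pyRange 0 (PySem.Str.len string) 1) then count + weight
          else count)
        acc
      = acc + ((sl.filter (fun e =>
          (PySem.Str.len e.1 == PySem.Str.len pattern) &&
          (pattern.toList.zip e.1.toList).all
            (fun pc => ([pc.1] == gap_char.toList) || (pc.1 == pc.2)))).map (·.2)).sum := by
  intro sl
  induction sl with
  | nil => intro acc; simp
  | cons e sl' ih =>
    intro acc
    simp only [List.foldl_cons, List.filter_cons]
    by_cases hlen : PySem.Str.len e.1 = PySem.Str.len pattern
    · rw [if_neg (not_not_intro hlen)]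
      have hL : e.1.toList.length = pattern.toList.length := by
        have h := hlen
        simp only [PySem.Str.len_eq] at h
        exact_mod_cast h
      have hc0 : ((0 : Nat) : Int) = (0 : Int) := by norm_num
      have hA : msInnerA pattern.toList e.1.toList gap_char.toList
          (PySem.List.pyRange 0 (PySem.Str.len e.1) 1)
          = (pattern.toList.zip e.1.toList).all
              (fun pc => ([pc.1] == gap_char.toList) || (pc.1 == pc.2)) := by
        have hl' : PySem.Str.len e.1 = (pattern.toList.length : Int) := by
          rw [hlen]; simp [PySem.Str.len_eq]
        rw [hl', ← hc0]
        have := msInnerA_eq_zip pattern.toList e.1.toList gap_char.toList hL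
          pattern.toList.length 0 (by omega)
        simpa using this
      have hbeq : (PySem.Str.len e.1 == PySem.Str.len pattern) = true := by rw [hlen]; simp
      rw [hA, hbeq, Bool.true_and]
      by_cases hm : ((pattern.toList.zip e.1.toList).all
          (fun pc => ([pc.1] == gap_char.toList) || (pc.1 == pc.2))) = true
      · rw [hm, ih]
        simp only [if_true, List.map_cons, List.sum_cons]
        ring
      · have hm' : ((pattern.toList.zip e.1.toList).all
            (fun pc => ([pc.1] == gap_char.toList) || (pc.1 == pc.2))) = false := by
          simpa using hm
        rw [hm', ih]
        simp
    · rw [if_pos hlen]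
      have hbeq : (PySem.Str.len e.1 == PySem.Str.len pattern) = false :=
        beq_eq_false_iff_ne.mpr hlen
      rw [hbeq, Bool.false_and, if_neg Bool.false_ne_true, ih]

-- ===== VERDICT (by name: the statement is the Claim_ definition above) =====
theorem match_strings_spec : Claim_equal_match_strings := by
  intro sl pattern gap _
  unfold Spec_match_strings match_strings match_strings_alt
  rw [a_fold_sum pattern gap sl 0,
      dict_fold_getD
        (fun e => (((pattern.toList.map (fun c => [c] == gap.toList)).zip e.1.toList).map
          (fun p => if p.1 then gap.toList else [p.2])).flatten)
        (fun e => PySem.Str.len e.1 == PySem.Str.len pattern)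
        pattern.toList sl PySem.Dict.empty]
  rw [PySem.Dict.getD_empty, zero_add, zero_add]
  congr 1
  congr 1
  apply List.filter_congr
  intro e _
  by_cases hlen : PySem.Str.len e.1 = PySem.Str.len pattern
  · have hbeq : (PySem.Str.len e.1 == PySem.Str.len pattern) = true := by rw [hlen]; simp
    rw [hbeq, Bool.true_and, Bool.true_and]
    have hL : pattern.toList.length = e.1.toList.length := by
      have h := hlen
      simp only [PySem.Str.len_eq] at h
      exact_mod_cast h.symm
    have := maskKey_eq_iff gap.toList pattern.toList e.1.toList hL
    by_cases hm : (pattern.toList.zip e.1.toList).all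
        (fun pc => ([pc.1] == gap.toList) || (pc.1 == pc.2)) = true
    · rw [hm]
      exact (beq_iff_eq.mpr (this.mpr hm)).symm
    · have hm' : (pattern.toList.zip e.1.toList).all
          (fun pc => ([pc.1] == gap.toList) || (pc.1 == pc.2)) = false := by simpa using hm
      rw [hm']
      symm
      rw [beq_eq_false_iff_ne]
      intro h
      exact hm (this.mp h)
  · have hbeq : (PySem.Str.len e.1 == PySem.Str.len pattern) = false :=
      beq_eq_false_iff_ne.mpr hlen
    rw [hbeq, Bool.false_and, Bool.false_and]
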